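-- pv_equiv track=rewrite | github.com/lessismoretest/wakeword-sherpa | scripts/build_keywords.py | split_pinyin_syllable
-- ===== SOURCE A (Python) =====
-- INITIALS = [
--     "zh", "ch", "sh", "b", "p", "m", "f", "d", "t", "n", "l", "g", "k", "h",
--     "j", "q", "x", "r", "z", "c", "s", "y", "w",
-- ]
--
-- def split_pinyin_syllable(s: str) -> list[str]:
--     s = s.strip().lower()
--     if not s:
--         return []
--     for ini in INITIALS:
--         if s.startswith(ini) and len(s) > len(ini):
--             rest = s[len(ini):]
--             return [ini, rest]
--     return [s]
-- ===== SOURCE B (Python) =====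
-- VOWELS = "aeiouv"
--
-- def split_pinyin_syllable(s: str) -> list[str]:
--     s = s.strip().lower()
--     n = len(s)
--     if n == 0:
--         return []
--     c = s[0]
--     if not ('a' <= c <= 'z') or c in VOWELS:
--         return [s]
--     k = 2 if (c in "zcs" and n > 2 and s[1] == 'h') else 1
--     if n > k:
--         return [s[:k], s[k:]]
--     return [s]
-- ===== Notes on version B (the rewrite author's own statement) =====
-- stated objective: alternative
-- what changed: B has no initials table at all: it classifies the first character by character class (any lowercase consonant except 'v' is an initial; 'z'/'c'/'s' followed by 'h' forms a digraph), computes a split length k from that classification, and slices once at k.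
import Mathlib
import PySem

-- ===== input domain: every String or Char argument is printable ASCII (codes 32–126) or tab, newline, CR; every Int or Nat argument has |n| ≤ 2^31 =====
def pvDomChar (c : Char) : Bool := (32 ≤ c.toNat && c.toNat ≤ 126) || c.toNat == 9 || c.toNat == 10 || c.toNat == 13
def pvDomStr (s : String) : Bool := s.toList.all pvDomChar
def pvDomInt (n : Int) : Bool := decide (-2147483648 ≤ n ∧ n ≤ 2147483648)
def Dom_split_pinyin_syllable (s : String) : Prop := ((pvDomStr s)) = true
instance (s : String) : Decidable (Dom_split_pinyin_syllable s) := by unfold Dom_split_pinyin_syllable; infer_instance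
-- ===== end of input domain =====

-- B drops A's initials table entirely: it classifies the first character (a lowercase
-- consonant other than 'v' is an initial; a 'z'/'c'/'s' followed by 'h' is a digraph)
-- and splits by a computed prefix length.

-- ===== PORT A =====
def INITIALS : List String :=
  ["zh", "ch", "sh", "b", "p", "m", "f", "d", "t", "n", "l", "g", "k", "h",
   "j", "q", "x", "r", "z", "c", "s", "y", "w"]

-- the `for ini in INITIALS` loop of A, with the early `return [ini, rest]`
def splitLoop (t : String) : List String → List String
  | [] => [t]
  | ini :: rest =>
      if PySem.Str.startswith t ini && decide (PySem.Str.len t > PySem.Str.len ini) then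
        [ini, PySem.Str.slice t (some (PySem.Str.len ini)) none]
      else splitLoop t rest

def split_pinyin_syllable (s : String) : List String :=
  let t := PySem.Str.lower (PySem.Str.strip s)
  if t = "" then [] else splitLoop t INITIALS

-- ===== PORT B =====
def VOWELS : List Char := ['a', 'e', 'i', 'o', 'u', 'v']

-- body of Source B after the `n == 0` guard: classify the first character `c` (Python's
-- `s[0]` / `s[1]`), computing the split length k from it; `[]` is the `n == 0` return
def splitHead (t : String) (n : Int) : List Char → List String
  | [] => []
  | c :: rest =>
    if ¬('a' ≤ c ∧ c ≤ 'z') ∨ c ∈ VOWELS then [t]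
    else
      let k : Int := if c ∈ (['z', 'c', 's'] : List Char) ∧ n > 2 ∧ rest.head? = some 'h'
                     then 2 else 1
      if n > k then [PySem.Str.slice t none (some k), PySem.Str.slice t (some k) none]
      else [t]

def split_pinyin_syllable_alt (s : String) : List String :=
  let t := PySem.Str.lower (PySem.Str.strip s)
  splitHead t (PySem.Str.len t) t.toList

-- ===== PRECONDITION & SPEC =====
def Spec_split_pinyin_syllable (s : String) (out : List String) : Prop := out = split_pinyin_syllable_alt s
instance (s : String) (out : List String) : Decidable (Spec_split_pinyin_syllable s out) := by unfold Spec_split_pinyin_syllable; infer_instance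

-- ===== CLAIM (what is proved, stated in full; the proofs are below) =====
def Claim_equal_split_pinyin_syllable : Prop := ∀ (s : String), Dom_split_pinyin_syllable s → Spec_split_pinyin_syllable s (split_pinyin_syllable s)

-- ===== LEMMAS AND PROOFS =====

-- proof-side regrouping of A's list by prefix length
def TWO_INITIALS : List String := ["zh", "ch", "sh"]
def ONE_INITIALS : List String :=
  ["b", "p", "m", "f", "d", "t", "n", "l", "g", "k", "h",
   "j", "q", "x", "r", "z", "c", "s", "y", "w"]

lemma toList_slice_toI (t : String) (b : Int) (hb : 0 ≤ b) :
    (PySem.Str.slice t none (some b)).toList = t.toList.take b.toNat := by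
  simp [PySem.Str.toList_slice, PySem.Chars.slice_eq_listSlice, PySem.List.slice_to _ hb]

lemma char_eq_iff (c d : Char) : c = d ↔ c.val.toNat = d.val.toNat := by
  constructor
  · rintro rfl; rfl
  · intro h; exact Char.ext (UInt32.toNat_inj.mp h)
-- A's scan over a block of initials of uniform length n is a membership test on t[:n]
lemma splitLoop_append (t : String) (n : Nat) (u v : List String)
    (h : ∀ ini ∈ u, ini.toList.length = n) :
    splitLoop t (u ++ v) =
      if (n : Int) < PySem.Str.len t ∧ PySem.Str.slice t none (some (n : Int)) ∈ u then
        [PySem.Str.slice t none (some (n : Int)), PySem.Str.slice t (some (n : Int)) none]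
      else splitLoop t v := by
  induction u with
  | nil => simp
  | cons ini u ih =>
    have hlen : ini.toList.length = n := h ini (by simp)
    have hih := ih (fun i hi => h i (by simp [hi]))
    have hslice : (PySem.Str.slice t none (some (n : Int))).toList = t.toList.take n := by
      simp [PySem.Str.toList_slice, PySem.Chars.slice_eq_listSlice, PySem.List.slice_to_natCast]
    have hlent : PySem.Str.len t = (t.toList.length : Int) := by
      simp [PySem.Str.len_eq]
    have hleni : PySem.Str.len ini = (n : Int) := by
      simp [PySem.Str.len_eq, hlen]
    by_cases hgt : (n : Int) < PySem.Str.len t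
    · have hgtn : n < t.toList.length := by
        rw [hlent] at hgt; exact_mod_cast hgt
      by_cases hpre : ini.toList <+: t.toList
      · -- ini matches here: t[:n] = ini, both sides return the split at n
        have htake : ini.toList = t.toList.take n := by
          rw [List.prefix_iff_eq_take] at hpre; rw [hpre, hlen]
        have heq : PySem.Str.slice t none (some (n : Int)) = ini :=
          String.toList_inj.mp (by rw [hslice, htake])
        have hsw : PySem.Str.startswith t ini = true := by
          rw [PySem.Str.startswith_eq, PySem.Chars.startswith_iff]; exact hpre
        have hcond : (PySem.Str.startswith t ini
            && decide (PySem.Str.len t > PySem.Str.len ini)) = true := by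
          rw [hsw, hleni, hlent]
          simp only [Bool.true_and, decide_eq_true_eq, gt_iff_lt]
          exact_mod_cast hgtn
        have hstep : splitLoop t (ini :: (u ++ v))
            = [ini, PySem.Str.slice t (some (PySem.Str.len ini)) none] := by
          simp only [splitLoop, hcond]; simp
        rw [List.cons_append, hstep, hleni,
          if_pos ⟨hgt, by rw [heq]; exact List.mem_cons_self⟩, heq]
      · -- ini does not match: t[:n] ≠ ini, fall through to the tail
        have hne : PySem.Str.slice t none (some (n : Int)) ≠ ini := by
          intro hcontra
          apply hpre
          have hx : ini.toList = t.toList.take n := by rw [← hcontra, hslice]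
          rw [hx]; exact List.take_prefix n t.toList
        have hsw : PySem.Str.startswith t ini = false := by
          rw [PySem.Str.startswith_eq, Bool.eq_false_iff]
          intro hc
          exact hpre ((PySem.Chars.startswith_iff _ _).mp hc)
        have hstep : splitLoop t (ini :: (u ++ v)) = splitLoop t (u ++ v) := by
          simp only [splitLoop, hsw]; simp
        rw [List.cons_append, hstep, hih]
        by_cases hmem : PySem.Str.slice t none (some (n : Int)) ∈ u
        · rw [if_pos ⟨hgt, hmem⟩, if_pos ⟨hgt, List.mem_cons_of_mem _ hmem⟩]
        · rw [if_neg (by tauto), if_neg (by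
            rintro ⟨-, hm⟩
            rcases List.mem_cons.mp hm with h1 | h2
            · exact hne h1
            · exact hmem h2)]
    · -- the length guard fails for every initial in this uniform-length block
      have hcond : (PySem.Str.startswith t ini
          && decide (PySem.Str.len t > PySem.Str.len ini)) = false := by
        rw [hleni]
        simp only [Bool.and_eq_false_iff]
        right
        simpa using not_lt.mp (fun hc => hgt hc)
      have hstep : splitLoop t (ini :: (u ++ v)) = splitLoop t (u ++ v) := by
        simp only [splitLoop, hcond]; simp
      rw [List.cons_append, hstep, hih]
      rw [if_neg (by tauto), if_neg (by tauto)]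

lemma splitLoop_eq_alt_branches (t : String) :
    splitLoop t INITIALS =
      if (2 : Int) < PySem.Str.len t ∧ PySem.Str.slice t none (some 2) ∈ TWO_INITIALS then
        [PySem.Str.slice t none (some 2), PySem.Str.slice t (some 2) none]
      else if (1 : Int) < PySem.Str.len t ∧ PySem.Str.slice t none (some 1) ∈ ONE_INITIALS then
        [PySem.Str.slice t none (some 1), PySem.Str.slice t (some 1) none]
      else [t] := by
  have hsplit : INITIALS = TWO_INITIALS ++ ONE_INITIALS := by decide
  rw [hsplit]
  rw [splitLoop_append t 2 TWO_INITIALS ONE_INITIALS (by decide)]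
  rw [show ONE_INITIALS = ONE_INITIALS ++ [] from (List.append_nil _).symm,
      splitLoop_append t 1 ONE_INITIALS [] (by decide)]
  norm_num [splitLoop]

-- single-char membership in A's table IS B's character classification
lemma mem_one_iff (c : Char) (x : String) (hx : x.toList = [c]) :
    x ∈ ONE_INITIALS ↔ (('a' ≤ c ∧ c ≤ 'z') ∧ c ∉ VOWELS) := by
  simp only [ONE_INITIALS, VOWELS, List.mem_cons, List.not_mem_nil, or_false,
    ← String.toList_inj, hx]
  simp only [show ("b":String).toList = ['b'] from rfl, show ("p":String).toList = ['p'] from rfl, show ("m":String).toList = ['m'] from rfl, show ("f":String).toList = ['f'] from rfl, show ("d":String).toList = ['d'] from rfl, show ("t":String).toList = ['t'] from rfl, show ("n":String).toList = ['n'] from rfl, show ("l":String).toList = ['l'] from rfl, show ("g":String).toList = ['g'] from rfl, show ("k":String).toList = ['k'] from rfl, show ("h":String).toList = ['h'] from rfl, show ("j":String).toList = ['j'] from rfl, show ("q":String).toList = ['q'] from rfl, show ("x":String).toList = ['x'] from rfl, show ("r":String).toList = ['r'] from rfl, show ("z":String).toList = ['z'] from rfl, show ("c":String).toList = ['c'] from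 rfl, show ("s":String).toList = ['s'] from rfl, show ("y":String).toList = ['y'] from rfl, show ("w":String).toList = ['w'] from rfl]
  simp only [List.cons.injEq, and_true, Char.le_def, UInt32.le_iff_toNat_le, char_eq_iff]
  simp only [show ('a').val.toNat = 97 from rfl, show ('b').val.toNat = 98 from rfl, show ('c').val.toNat = 99 from rfl, show ('d').val.toNat = 100 from rfl, show ('e').val.toNat = 101 from rfl, show ('f').val.toNat = 102 from rfl, show ('g').val.toNat = 103 from rfl, show ('h').val.toNat = 104 from rfl, show ('i').val.toNat = 105 from rfl, show ('j').val.toNat = 106 from rfl, show ('k').val.toNat = 107 from rfl, show ('l').val.toNat = 108 from rfl, show ('m').val.toNat = 109 from rfl, show ('n').val.toNat = 110 from rfl, show ('o').val.toNat = 111 from rfl, show ('p').val.toNat = 112 from rfl, show ('q').val.toNat = 113 from rfl, show ('r').val.toNat = 114 from rfl, show ('s').val.toNat = 115 from rfl, show ('t').val.toNat = 116 from rfl, show ('u').val.toNat = 117 from rfl, show ('v').val.toNat = 118 from rfl, show ('w').val.toNat = 119 from rfl, show ('x').val.toNat = 120 from rfl, show ('y').val.toNat = 121 from rfl, show ('z').val.toNat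 = 122 from rfl]
  omega


lemma mem_two_iff (c d : Char) (x : String) (hx : x.toList = [c, d]) :
    x ∈ TWO_INITIALS ↔ (c ∈ (['z', 'c', 's'] : List Char) ∧ d = 'h') := by
  simp only [TWO_INITIALS, List.mem_cons, List.not_mem_nil, or_false,
    ← String.toList_inj, hx,
    show ("zh":String).toList = ['z','h'] from rfl,
    show ("ch":String).toList = ['c','h'] from rfl,
    show ("sh":String).toList = ['s','h'] from rfl,
    List.cons.injEq, and_true]
  tauto

-- ===== VERDICT (by name: the statement is the Claim_ definition above) =====
theorem split_pinyin_syllable_spec : Claim_equal_split_pinyin_syllable := by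
  intro s _
  unfold Spec_split_pinyin_syllable split_pinyin_syllable split_pinyin_syllable_alt
  set t := PySem.Str.lower (PySem.Str.strip s) with ht
  clear ht
  by_cases h0 : t = ""
  · simp [h0, splitHead]
  · simp only [if_neg h0]
    rw [splitLoop_eq_alt_branches]
    obtain ⟨c, rest, hcl⟩ : ∃ c rest, t.toList = c :: rest := by
      cases hl : t.toList with
      | nil => exact absurd (String.toList_inj.mp (by simp [hl])) h0
      | cons c rest => exact ⟨c, rest, rfl⟩
    have hlent : PySem.Str.len t = ((rest.length + 1 : Nat) : Int) := by
      simp [PySem.Str.len_eq, hcl]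
    have hsl1 : (PySem.Str.slice t none (some (1 : Int))).toList = [c] := by
      rw [toList_slice_toI t 1 (by norm_num), hcl]
      rfl
    rw [hcl]
    simp only [splitHead]
    by_cases hcons : ('a' ≤ c ∧ c ≤ 'z') ∧ c ∉ VOWELS
    · -- first char is a consonant initial
      have hgood : ¬(¬('a' ≤ c ∧ c ≤ 'z') ∨ c ∈ VOWELS) := fun h => h.elim (fun hn => hn hcons.1) hcons.2
      rw [if_neg hgood]
      by_cases h2 : c ∈ (['z', 'c', 's'] : List Char) ∧ PySem.Str.len t > 2 ∧ rest.head? = some 'h'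
      · -- digraph case: split at 2 on both sides
        have h2' := h2
        obtain ⟨hzcs, hgt2, hh⟩ := h2'
        obtain ⟨d, rest', hr⟩ : ∃ d rest', rest = d :: rest' := by
          cases rest with
          | nil => simp at hh
          | cons d r => exact ⟨d, r, rfl⟩
        have hd : d = 'h' := by simp [hr] at hh; exact hh
        have hsl2 : (PySem.Str.slice t none (some (2 : Int))).toList = [c, d] := by
          rw [toList_slice_toI t 2 (by norm_num), hcl, hr]
          rfl
        rw [if_pos h2, if_pos hgt2,
          if_pos (show (2 : Int) < PySem.Str.len t ∧
              PySem.Str.slice t none (some 2) ∈ TWO_INITIALS from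
            ⟨hgt2, (mem_two_iff c d _ hsl2).mpr ⟨hzcs, hd⟩⟩)]
      · -- single-char initial: the two-char branch fails on both sides
        rw [if_neg h2]
        have hno2 : ¬((2 : Int) < PySem.Str.len t ∧
            PySem.Str.slice t none (some 2) ∈ TWO_INITIALS) := by
          rintro ⟨hgt2, hmem⟩
          apply h2
          obtain ⟨d, rest', hr⟩ : ∃ d rest', rest = d :: rest' := by
            cases rest with
            | nil => rw [hlent] at hgt2; simp at hgt2
            | cons d r => exact ⟨d, r, rfl⟩
          have hsl2 : (PySem.Str.slice t none (some (2 : Int))).toList = [c, d] := by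
            rw [toList_slice_toI t 2 (by norm_num), hcl, hr]
            rfl
          obtain ⟨hzcs, hd⟩ := (mem_two_iff c d _ hsl2).mp hmem
          exact ⟨hzcs, hgt2, by simp [hr, hd]⟩
        rw [if_neg hno2]
        by_cases hgt1 : (1 : Int) < PySem.Str.len t
        · rw [if_pos (show (1 : Int) < PySem.Str.len t ∧
              PySem.Str.slice t none (some 1) ∈ ONE_INITIALS from
              ⟨hgt1, (mem_one_iff c _ hsl1).mpr hcons⟩), if_pos hgt1]
        · rw [if_neg (show ¬((1 : Int) < PySem.Str.len t ∧
              PySem.Str.slice t none (some 1) ∈ ONE_INITIALS) from fun h => hgt1 h.1),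
            if_neg hgt1]
    · -- first char is not an initial: both sides return [t]
      have hbad : ¬('a' ≤ c ∧ c ≤ 'z') ∨ c ∈ VOWELS := by
        by_cases hm : c ∈ VOWELS
        · exact Or.inr hm
        · exact Or.inl fun hab => hcons ⟨hab, hm⟩
      rw [if_pos hbad]
      have hno2 : ¬((2 : Int) < PySem.Str.len t ∧
          PySem.Str.slice t none (some 2) ∈ TWO_INITIALS) := by
        rintro ⟨hgt2, hmem⟩
        obtain ⟨d, rest', hr⟩ : ∃ d rest', rest = d :: rest' := by
          cases rest with
          | nil => rw [hlent] at hgt2; simp at hgt2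
          | cons d r => exact ⟨d, r, rfl⟩
        have hsl2 : (PySem.Str.slice t none (some (2 : Int))).toList = [c, d] := by
          rw [toList_slice_toI t 2 (by norm_num), hcl, hr]
          rfl
        obtain ⟨hzcs, -⟩ := (mem_two_iff c d _ hsl2).mp hmem
        apply hcons
        fin_cases hzcs <;> exact ⟨⟨by decide, by decide⟩, by decide⟩
      have hno1 : ¬((1 : Int) < PySem.Str.len t ∧
          PySem.Str.slice t none (some 1) ∈ ONE_INITIALS) := by
        rintro ⟨-, hmem⟩
        exact hcons ((mem_one_iff c _ hsl1).mp hmem)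
      rw [if_neg hno2, if_neg hno1]
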